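-- pv_equiv track=rewrite | github.com/Habounou/Tutorat_Info | Julien.py | avancer_joueur
-- ===== SOURCE A (Python) =====
-- def avancer_joueur(jeu_fc):
--     plancher = jeu_fc[-1]
--
--     plancher_temp = ""
--     positions_tiret = []
--     for i in range(len(plancher)):
--         if plancher[i] == "-":
--             positions_tiret.append(i)
--
--     position_joueur = plancher.find("o")
--     for i in range(len(plancher)):
--         if i == position_joueur + 1:
--             plancher_temp += "o"
--         elif i in positions_tiret:
--             plancher_temp += "-"
--         else:
--             plancher_temp += "_"
--
--     jeu_fc[-1] = plancher_temp
--     return jeu_fc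
-- ===== SOURCE B (Python) =====
-- def avancer_joueur(jeu_fc):
--     plancher = jeu_fc[-1]
--     # One-pass state machine over the floor, no find() and no index arithmetic:
--     # state 0 = still searching for the player, 1 = place the player at the
--     # current cell, 2 = player already placed.  Starting in state 1 when no
--     # player is present reproduces the spawn-at-left-edge behaviour.
--     state = 0 if "o" in plancher else 1
--     out = []
--     for c in plancher:
--         if state == 1:
--             out.append("o")
--             state = 2
--         else:
--             if state == 0 and c == "o":
--                 state = 1
--             out.append("-" if c == "-" else "_")
--     jeu_fc[-1] = "".join(out)
--     return jeu_fc
-- ===== Notes on version B (the rewrite author's own statement) =====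
-- stated objective: alternative
-- what changed: Replaces A's two index loops (a precomputed dash-position list with an 'i in positions_tiret' membership scan, plus a find()-based three-way branch per position) by a single left-to-right state-machine pass over the characters that carries a searching/place-now/done state and never computes positions.
import Mathlib
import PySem

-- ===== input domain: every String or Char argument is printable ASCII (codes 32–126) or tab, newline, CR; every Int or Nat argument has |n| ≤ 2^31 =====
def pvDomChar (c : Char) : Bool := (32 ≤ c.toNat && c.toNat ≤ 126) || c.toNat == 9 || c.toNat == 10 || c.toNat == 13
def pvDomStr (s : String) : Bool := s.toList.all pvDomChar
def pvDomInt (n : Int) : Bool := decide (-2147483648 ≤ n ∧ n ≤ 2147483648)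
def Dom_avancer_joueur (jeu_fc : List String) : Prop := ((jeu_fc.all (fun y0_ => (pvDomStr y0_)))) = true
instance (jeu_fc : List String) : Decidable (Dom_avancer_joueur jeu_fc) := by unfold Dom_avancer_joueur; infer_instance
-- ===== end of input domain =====

-- B replaces A's two index loops (dash-position list + find()-based branch) by one
-- state-machine pass; return value AND the in-place last-element mutation match.
-- ===== PORT A =====
def avancer_joueur (jeu_fc : List String) : List String :=
  let plancher := (PySem.List.pyGetD jeu_fc (-1) "").toList
  let n : Int := plancher.length
  let positions_tiret : List Int :=
    (PySem.List.pyRange 0 n 1).foldl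
      (fun acc i => if PySem.List.pyGetD plancher i ' ' = '-' then acc ++ [i] else acc) []
  let position_joueur := PySem.Chars.find plancher ['o']
  let plancher_temp : List Char :=
    (PySem.List.pyRange 0 n 1).foldl
      (fun acc i =>
        if i = position_joueur + 1 then acc ++ ['o']
        else if i ∈ positions_tiret then acc ++ ['-']
        else acc ++ ['_']) []
  PySem.List.pySetD jeu_fc (-1) (String.ofList plancher_temp)

-- ===== PORT B =====
def avancer_joueur_alt (jeu_fc : List String) : List String :=
  let plancher := PySem.List.pyGetD jeu_fc (-1) ""
  let cs := plancher.toList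
  let state0 : Nat := if PySem.Str.isIn "o" plancher then 0 else 1
  let r := cs.foldl
    (fun (p : Nat × List Char) c =>
      if p.1 = 1 then (2, p.2 ++ ['o'])
      else ((if p.1 = 0 ∧ c = 'o' then 1 else p.1),
            p.2 ++ [if c = '-' then '-' else '_'])) (state0, ([] : List Char))
  PySem.List.pySetD jeu_fc (-1) (String.ofList r.2)

-- ===== PRECONDITION & SPEC =====
-- jeu_fc[-1] raises IndexError on an empty list, so Pre_ excludes it.
def Pre_avancer_joueur (jeu_fc : List String) : Prop := jeu_fc ≠ []
instance (jeu_fc : List String) : Decidable (Pre_avancer_joueur jeu_fc) := by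
  unfold Pre_avancer_joueur; infer_instance
def pvWitness_avancer_joueur : List String := ["_-o-_"]
def Spec_avancer_joueur (jeu_fc : List String) (out : List String) : Prop := out = avancer_joueur_alt jeu_fc
instance (jeu_fc : List String) (out : List String) : Decidable (Spec_avancer_joueur jeu_fc out) := by unfold Spec_avancer_joueur; infer_instance

-- ===== CLAIM (what is proved, stated in full; the proofs are below) =====
def Claim_equal_avancer_joueur : Prop := ∀ (jeu_fc : List String), Dom_avancer_joueur jeu_fc → Pre_avancer_joueur jeu_fc → Spec_avancer_joueur jeu_fc (avancer_joueur jeu_fc)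

-- ===== LEMMAS AND PROOFS =====

-- A's two range-loops produce the cleared floor with 'o' spliced in at find+1.
theorem floors_eq (cs : List Char) :
    (let n : Int := cs.length
     let positions_tiret : List Int :=
       (PySem.List.pyRange 0 n 1).foldl
         (fun acc i => if PySem.List.pyGetD cs i ' ' = '-' then acc ++ [i] else acc) []
     let pos := PySem.Chars.find cs ['o']
     (PySem.List.pyRange 0 n 1).foldl
       (fun acc i =>
         if i = pos + 1 then acc ++ ['o']
         else if i ∈ positions_tiret then acc ++ ['-']
         else acc ++ ['_']) []) =
    (let pos := PySem.Chars.find cs ['o']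
     let base := cs.map (fun c => if c = '-' then '-' else '_')
     if pos + 1 < (cs.length : Int) then
       PySem.List.slice base none (some (pos + 1)) ++ ['o'] ++
         PySem.List.slice base (some (pos + 2)) none
     else base) := by
  have hm1 : -1 ≤ PySem.Chars.find cs ['o'] := PySem.Chars.neg_one_le_find cs ['o']
  simp only []
  set pos := PySem.Chars.find cs ['o'] with hpos
  set P := (PySem.List.pyRange 0 (cs.length : Int) 1).filter
      (fun i => decide (PySem.List.pyGetD cs i ' ' = '-')) with hP
  have hpositions : (PySem.List.pyRange 0 (cs.length : Int) 1).foldl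
      (fun acc i => if PySem.List.pyGetD cs i ' ' = '-' then acc ++ [i] else acc) [] = P := by
    have h := PySem.List.foldl_append_if
      (fun i => decide (PySem.List.pyGetD cs i ' ' = '-')) id
      (PySem.List.pyRange 0 (cs.length : Int) 1) []
    simpa using h
  rw [hpositions]
  have hbody : (fun (acc : List Char) (i : Int) =>
      if i = pos + 1 then acc ++ ['o']
      else if i ∈ P then acc ++ ['-'] else acc ++ ['_']) =
      (fun acc i => acc ++ [if i = pos + 1 then 'o'
        else if i ∈ P then '-' else '_']) := by
    funext acc i; split_ifs <;> rfl
  rw [hbody, PySem.List.foldl_append_singleton_eq_map, List.nil_append,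
      PySem.List.pyRange_one]
  rw [List.map_map]
  have hmem : ∀ (k : Nat) (hk : k < cs.length), ((k : Int) ∈ P ↔ cs[k] = '-') := by
    intro k hk
    rw [hP, List.mem_filter]
    simp [PySem.List.mem_pyRange_one, List.getD_eq_getElem?_getD, hk]
  have hg : ∀ (k : Nat) (hk : k < cs.length),
      ((fun i => if i = pos + 1 then 'o' else if i ∈ P then '-' else '_') ∘
        fun (j : Nat) => (0 : Int) + j) k =
      if (k : Int) = pos + 1 then 'o'
      else (if cs[k] = '-' then '-' else '_') := by
    intro k hk
    simp only [Function.comp, zero_add]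
    by_cases h1 : (k : Int) = pos + 1
    · simp [h1]
    · simp [h1, hmem k hk]
  by_cases hlt : pos + 1 < (cs.length : Int)
  · rw [if_pos hlt, PySem.List.slice_to _ (by omega), PySem.List.slice_from _ (by omega)]
    have hp0 : (0 : Int) ≤ pos + 1 := by omega
    set p : Nat := (pos + 1).toNat with hpdef
    have hpcast : (p : Int) = pos + 1 := Int.toNat_of_nonneg hp0
    have hp2 : (pos + 2).toNat = p + 1 := by omega
    have hpn : p < cs.length := by omega
    rw [hp2]
    have hT : (List.take p (List.map (fun c => if c = '-' then '-' else '_') cs)).length = p := by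
      simp only [List.length_take, List.length_map]; omega
    apply List.ext_getElem
    · simp only [List.length_map, List.length_range, List.length_append, hT,
        List.length_cons, List.length_nil, List.length_drop]
      omega
    · intro k hk1 hk2
      simp only [List.length_map, List.length_range] at hk1
      rw [List.getElem_map, List.getElem_range, hg k (by omega)]
      rcases lt_trichotomy k p with hkp | hkp | hkp
      · have hne : (k : Int) ≠ pos + 1 := by omega
        rw [if_neg hne]
        rw [List.getElem_append_left (by
          simp only [List.length_append, hT, List.length_cons, List.length_nil]; omega)]
        rw [List.getElem_append_left (by rw [hT]; omega)]
        rw [List.getElem_take, List.getElem_map]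
      · have heq : (k : Int) = pos + 1 := by omega
        rw [if_pos heq]
        subst hkp
        rw [List.getElem_append_left (by
          simp only [List.length_append, hT, List.length_cons, List.length_nil]; omega)]
        rw [List.getElem_append_right hT.le]
        simp [hT]
      · have hne : (k : Int) ≠ pos + 1 := by omega
        rw [if_neg hne]
        have hTo : (List.take p (List.map (fun c => if c = '-' then '-' else '_') cs)
            ++ ['o']).length = p + 1 := by
          simp only [List.length_append, hT, List.length_cons, List.length_nil]
        rw [List.getElem_append_right (by rw [hTo]; omega)]
        rw [List.getElem_drop, List.getElem_map]
        have hidx : p + 1 + (k - (List.take p (List.map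
            (fun c => if c = '-' then '-' else '_') cs) ++ ['o']).length) = k := by
          rw [hTo]; omega
        simp only [hidx]
  · rw [if_neg hlt]
    apply List.ext_getElem
    · simp
    · intro k hk1 hk2
      simp only [List.length_map, List.length_range] at hk1
      rw [List.getElem_map, List.getElem_range, hg k (by omega), List.getElem_map]
      have hne : (k : Int) ≠ pos + 1 := by omega
      rw [if_neg hne]

-- Proof-side recursive form of B's state machine.
def pvRun : Nat → List Char → List Char
  | _, [] => []
  | s, c :: r =>
      if s = 1 then 'o' :: pvRun 2 r
      else (if c = '-' then '-' else '_') :: pvRun (if s = 0 ∧ c = 'o' then 1 else s) r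

theorem fold_eq_run (cs : List Char) (s : Nat) (acc : List Char) :
    (cs.foldl
      (fun (p : Nat × List Char) c =>
        if p.1 = 1 then (2, p.2 ++ ['o'])
        else ((if p.1 = 0 ∧ c = 'o' then 1 else p.1),
              p.2 ++ [if c = '-' then '-' else '_'])) (s, acc)).2 = acc ++ pvRun s cs := by
  induction cs generalizing s acc with
  | nil => simp [pvRun]
  | cons c r ih =>
      by_cases hs : s = 1
      · simp [pvRun, hs, ih]
      · simp [pvRun, hs, List.foldl_cons, ih]

theorem run_two (cs : List Char) :
    pvRun 2 cs = cs.map (fun c => if c = '-' then '-' else '_') := by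
  induction cs with
  | nil => rfl
  | cons c r ih => simp [pvRun, ih]

theorem run_one (cs : List Char) :
    pvRun 1 cs = (match cs with
      | [] => []
      | _ :: r => 'o' :: r.map (fun c => if c = '-' then '-' else '_')) := by
  cases cs with
  | nil => rfl
  | cons c r => simp [pvRun, run_two]

theorem run_zero_mem (cs : List Char) (p : Nat) (hp : p < cs.length)
    (ho : cs[p] = 'o') (hmin : ∀ i (hi : i < cs.length), i < p → cs[i] ≠ 'o') :
    pvRun 0 cs =
      (cs.take (p + 1)).map (fun c => if c = '-' then '-' else '_')
        ++ pvRun 1 (cs.drop (p + 1)) := by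
  induction cs generalizing p with
  | nil => simp at hp
  | cons c r ih =>
      cases p with
      | zero =>
          simp only [List.getElem_cons_zero] at ho
          subst ho
          simp [pvRun]
      | succ q =>
          have hc : c ≠ 'o' := by
            have := hmin 0 (by simp) (Nat.succ_pos q)
            simpa using this
          have hq : q < r.length := by simpa using hp
          have hoq : r[q] = 'o' := by simpa using ho
          have hminq : ∀ i (hi : i < r.length), i < q → r[i] ≠ 'o' := by
            intro i hi hiq
            have := hmin (i + 1) (by simpa using Nat.succ_lt_succ hi) (Nat.succ_lt_succ hiq)
            simpa using this
          simp [pvRun, fun h' : c = 'o' => hc h', ih q hq hoq hminq]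

theorem singleton_infix_iff (a : Char) (l : List Char) : [a] <:+: l ↔ a ∈ l := by
  constructor
  · intro h
    exact (List.singleton_sublist).1 h.sublist
  · intro h
    obtain ⟨s, t, hst⟩ := List.append_of_mem h
    exact ⟨s, t, by simp [hst]⟩

theorem prefix_singleton_drop (cs : List Char) (i : Nat) (hi : i < cs.length) :
    ['o'] <+: cs.drop i ↔ cs[i] = 'o' := by
  rw [List.drop_eq_getElem_cons hi]
  constructor
  · intro h
    have := (List.cons_prefix_cons.1 h).1
    exact this.symm
  · intro h
    exact List.cons_prefix_cons.2 ⟨h.symm, List.nil_prefix⟩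

-- The slice-splice form of the new floor equals the state machine's output.
theorem slice_eq_run (cs : List Char) :
    (let pos := PySem.Chars.find cs ['o']
     let base := cs.map (fun c => if c = '-' then '-' else '_')
     if pos + 1 < (cs.length : Int) then
       PySem.List.slice base none (some (pos + 1)) ++ ['o'] ++
         PySem.List.slice base (some (pos + 2)) none
     else base) =
    pvRun (if 'o' ∈ cs then 0 else 1) cs := by
  simp only []
  set pos := PySem.Chars.find cs ['o'] with hposdef
  by_cases hmem : 'o' ∈ cs
  · rw [if_pos hmem]
    have hinf : ['o'] <:+: cs := (singleton_infix_iff 'o' cs).2 hmem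
    have hpos0 : 0 ≤ pos := (PySem.Chars.find_nonneg_iff cs ['o']).2 hinf
    obtain ⟨hpre, hmin⟩ := PySem.Chars.find_spec hpos0
    set p : Nat := pos.toNat with hpdef
    have hpn : p < cs.length := by
      by_contra hge
      have : cs.drop p = [] := List.drop_eq_nil_of_le (by omega)
      rw [this] at hpre
      exact absurd (List.prefix_nil.1 hpre) (by simp)
    have hop : cs[p] = 'o' := (prefix_singleton_drop cs p hpn).1 hpre
    have hminp : ∀ i (hi : i < cs.length), i < p → cs[i] ≠ 'o' := by
      intro i hi hip hcontra
      exact hmin i hip ((prefix_singleton_drop cs i hi).2 hcontra)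
    rw [run_zero_mem cs p hpn hop hminp]
    have hpcast : (p : Int) = pos := Int.toNat_of_nonneg hpos0
    by_cases hlt : pos + 1 < (cs.length : Int)
    · rw [if_pos hlt, PySem.List.slice_to _ (by omega), PySem.List.slice_from _ (by omega)]
      have h1 : (pos + 1).toNat = p + 1 := by omega
      have h2 : (pos + 2).toNat = p + 2 := by omega
      rw [h1, h2, ← List.map_take, ← List.map_drop]
      have hp1 : p + 1 < cs.length := by omega
      rw [List.drop_eq_getElem_cons hp1, run_one]
      simp
    · rw [if_neg hlt]
      have hdrop : cs.drop (p + 1) = [] := List.drop_eq_nil_of_le (by omega)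
      have htake : cs.take (p + 1) = cs := List.take_of_length_le (by omega)
      rw [hdrop, htake, run_one]
      simp
  · rw [if_neg hmem]
    have hpos : pos = -1 := by
      rw [hposdef, PySem.Chars.find_eq_neg_one_iff]
      exact fun h => hmem ((singleton_infix_iff 'o' cs).1 h)
    rw [run_one]
    cases cs with
    | nil => simp [hpos]
    | cons c r =>
        have hlt : pos + 1 < ((c :: r).length : Int) := by
          simp [hpos]
        rw [if_pos hlt, hpos]
        norm_num
        rw [PySem.List.slice_to _ (by omega), PySem.List.slice_from _ (by omega)]
        simp

-- ===== VERDICT (by name: the statement is the Claim_ definition above) =====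
theorem avancer_joueur_spec : Claim_equal_avancer_joueur := by
  intro jeu_fc _ _
  show avancer_joueur jeu_fc = avancer_joueur_alt jeu_fc
  simp only [avancer_joueur, avancer_joueur_alt]
  rw [floors_eq, slice_eq_run, fold_eq_run, List.nil_append]
  congr 2
  rw [PySem.Str.isIn_eq]
  by_cases h : 'o' ∈ (PySem.List.pyGetD jeu_fc (-1) "").toList
  · rw [if_pos h, if_pos]
    exact (PySem.Chars.isIn_iff_infix _ _).2 ((singleton_infix_iff _ _).2 (by simpa using h))
  · rw [if_neg h, if_neg]
    intro hc
    exact h (by simpa using (singleton_infix_iff _ _).1 ((PySem.Chars.isIn_iff_infix _ _).1 hc))
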